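-- pv_equiv track=rewrite | github.com/petercai/uml-gen-java | uml/.gen/umlgen_pkg/umlgen_matched.py | _strip_existing_matched
-- ===== SOURCE A (Python) =====
-- def _strip_existing_matched(lines: list[str]) -> list[str]:
--     output: list[str] = []
--     in_matched_block = False
--
--     for line in lines:
--         stripped = line.strip()
--
--         if not in_matched_block and stripped.startswith("matched:") and not line.startswith(" "):
--             in_matched_block = True
--             continue
--
--         if in_matched_block:
--             if not stripped:
--                 continue
--             if not line.startswith(" ") and ":" in stripped and not stripped.startswith("-"):
--                 in_matched_block = False
--                 output.append(line)
--             continue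
--
--         output.append(line)
--
--     return output
-- ===== SOURCE B (Python) =====
-- def _strip_existing_matched(lines: list[str]) -> list[str]:
--     output: list[str] = []
--     i = 0
--     n = len(lines)
--     while i < n:
--         line = lines[i]
--         stripped = line.strip()
--         if stripped.startswith("matched:") and not line.startswith(" "):
--             i += 1
--             while i < n:
--                 inner = lines[i]
--                 s = inner.strip()
--                 if not s:
--                     i += 1
--                     continue
--                 if not inner.startswith(" ") and ":" in s and not s.startswith("-"):
--                     output.append(inner)
--                     i += 1
--                     break
--                 i += 1
--             continue
--         output.append(line)
--         i += 1
--     return output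
-- ===== Notes on version B (the rewrite author's own statement) =====
-- stated objective: alternative
-- what changed: Replaces the boolean in_matched_block state flag threaded through one loop with an index-driven outer/inner while-loop pair (normal mode vs. block-skipping mode as separate loops), keeping the line predicates identical.
import Mathlib
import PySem

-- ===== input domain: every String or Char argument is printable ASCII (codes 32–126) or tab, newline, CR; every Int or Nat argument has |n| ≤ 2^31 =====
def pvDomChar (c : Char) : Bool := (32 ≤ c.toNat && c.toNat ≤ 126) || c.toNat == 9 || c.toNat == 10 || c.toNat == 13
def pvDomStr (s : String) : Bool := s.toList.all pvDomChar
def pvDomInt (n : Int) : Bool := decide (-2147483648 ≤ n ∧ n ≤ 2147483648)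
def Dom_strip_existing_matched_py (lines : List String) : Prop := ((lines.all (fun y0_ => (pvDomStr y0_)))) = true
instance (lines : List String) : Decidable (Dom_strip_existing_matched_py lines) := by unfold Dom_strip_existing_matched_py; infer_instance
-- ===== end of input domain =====

-- B rewrites A's flag-state loop as two dedicated loops (normal mode / skipping mode); same predicates, same cost.

-- ===== PORT A =====
-- A: one pass with accumulator (output, in_matched_block); output appended to on the right.
def stripMatchedStepA (st : List String × Bool) (line : String) : List String × Bool :=
  let stripped := PySem.Str.strip line
  if !st.2 && PySem.Str.startswith stripped "matched:" && !PySem.Str.startswith line " " then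
    (st.1, true)
  else if st.2 then
    if stripped == "" then (st.1, true)
    else if !PySem.Str.startswith line " " && PySem.Str.isIn ":" stripped
            && !PySem.Str.startswith stripped "-" then
      (st.1 ++ [line], false)
    else (st.1, true)
  else
    (st.1 ++ [line], false)

def strip_existing_matched_py (lines : List String) : List String :=
  (lines.foldl stripMatchedStepA ([], false)).1

-- ===== PORT B =====
-- B: outer loop (normal mode) and inner loop (inside a matched: block) as mutually
-- recursive passes over the remaining lines; ports Source B's outer/inner while loops.
mutual
def stripMatchedMainB : List String → List String
  | [] => []
  | line :: rest =>
    let stripped := PySem.Str.strip line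
    if PySem.Str.startswith stripped "matched:" && !PySem.Str.startswith line " " then
      stripMatchedSkipB rest
    else
      line :: stripMatchedMainB rest

def stripMatchedSkipB : List String → List String
  | [] => []
  | inner :: rest =>
    let s := PySem.Str.strip inner
    if s == "" then stripMatchedSkipB rest
    else if !PySem.Str.startswith inner " " && PySem.Str.isIn ":" s
            && !PySem.Str.startswith s "-" then
      inner :: stripMatchedMainB rest
    else stripMatchedSkipB rest
end

def strip_existing_matched_py_alt (lines : List String) : List String :=
  stripMatchedMainB lines

-- ===== PRECONDITION & SPEC =====
def Spec_strip_existing_matched_py (lines : List String) (out : List String) : Prop := out = strip_existing_matched_py_alt lines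
instance (lines : List String) (out : List String) : Decidable (Spec_strip_existing_matched_py lines out) := by unfold Spec_strip_existing_matched_py; infer_instance

-- ===== CLAIM (what is proved, stated in full; the proofs are below) =====
def Claim_equal_strip_existing_matched_py : Prop := ∀ (lines : List String), Dom_strip_existing_matched_py lines → Spec_strip_existing_matched_py lines (strip_existing_matched_py lines)

-- ===== LEMMAS AND PROOFS =====

-- Invariant: A's fold from state (out, b) yields out ++ (B's mode-b pass over the rest).
theorem stripMatched_fold_eq (lines : List String) :
    ∀ (out : List String) (b : Bool),
      (lines.foldl stripMatchedStepA (out, b)).1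
        = out ++ (if b then stripMatchedSkipB lines else stripMatchedMainB lines) := by
  induction lines with
  | nil => intro out b; cases b <;> simp [stripMatchedMainB, stripMatchedSkipB]
  | cons line rest ih =>
    intro out b
    cases b with
    | false =>
      simp only [List.foldl_cons, stripMatchedStepA, stripMatchedMainB]
      split_ifs with h1 <;> simp_all [ih]
    | true =>
      simp only [List.foldl_cons, stripMatchedStepA, stripMatchedSkipB]
      split_ifs with h0 h1 <;> simp_all [ih]

-- ===== VERDICT (by name: the statement is the Claim_ definition above) =====
theorem strip_existing_matched_py_spec : Claim_equal_strip_existing_matched_py := by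
  intro lines _
  unfold Spec_strip_existing_matched_py strip_existing_matched_py strip_existing_matched_py_alt
  simpa using stripMatched_fold_eq lines [] false
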